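-- pv_equiv track=rewrite | github.com/bubpen/codekata | 프로그래머스/0/181855. 문자열 묶기/문자열 묶기.py | solution
-- ===== SOURCE A (Python) =====
-- def solution(strArr):
--     length = []
--     for i in strArr:
--         length.append(len(i))
--     i =1
--     answer = 0
--     while i in length:
--         if answer < length.count(i):
--             answer = length.count(i)
--         i += 1
--     return answer
-- ===== SOURCE B (Python) =====
-- def solution(strArr):
--     cnt = {}
--     for s in strArr:
--         cnt[len(s)] = cnt.get(len(s), 0) + 1
--     answer = 0
--     expected = 1
--     for v in sorted(cnt):
--         if v < expected:
--             continue
--         if v > expected: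
--             break
--         if cnt[v] > answer:
--             answer = cnt[v]
--         expected += 1
--     return answer
-- ===== Notes on version B (the rewrite author's own statement) =====
-- stated objective: alternative
-- what changed: Builds a length->count dictionary in one pass and walks the sorted distinct lengths once (skip <expected, stop >expected), instead of re-scanning the whole lengths list for membership and count on every iteration of the while loop.
import Mathlib
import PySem

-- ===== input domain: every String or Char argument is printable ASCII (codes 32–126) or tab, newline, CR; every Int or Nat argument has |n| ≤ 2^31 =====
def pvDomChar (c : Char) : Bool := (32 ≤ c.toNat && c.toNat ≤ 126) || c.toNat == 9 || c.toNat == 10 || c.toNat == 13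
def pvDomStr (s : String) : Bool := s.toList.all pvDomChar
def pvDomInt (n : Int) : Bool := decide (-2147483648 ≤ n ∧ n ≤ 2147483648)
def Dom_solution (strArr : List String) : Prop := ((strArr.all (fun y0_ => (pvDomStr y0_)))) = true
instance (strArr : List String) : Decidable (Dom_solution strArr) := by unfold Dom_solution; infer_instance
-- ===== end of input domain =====

-- B replaces A's repeated list rescans (membership + count per while-iteration) by a
-- counting dictionary built once and a single walk over the sorted distinct lengths (alternative algorithm).


-- ===== PORT A =====
def pvMaxOf (l : List Int) : Int := l.foldr max 0

theorem pv_le_maxOf {l : List Int} {x : Int} (h : x ∈ l) : x ≤ pvMaxOf l := by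
  induction l with
  | nil => cases h
  | cons y t ih =>
    rcases List.mem_cons.mp h with h | h
    · subst h; exact le_max_left _ _
    · exact le_trans (ih h) (le_max_right _ _)

-- 'while i in length: if answer < length.count(i): answer = length.count(i); i += 1'
def solutionLoop (length : List Int) (i answer : Int) : Int :=
  if h : i ∈ length then
    solutionLoop length (i + 1)
      (if answer < (length.count i : Int) then (length.count i : Int) else answer)
  else answer
termination_by (pvMaxOf length + 1 - i).toNat
decreasing_by
  have := pv_le_maxOf h
  omega

def solution (strArr : List String) : Int :=
  let length : List Int := strArr.foldl (fun acc s => acc ++ [PySem.Str.len s]) []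
  solutionLoop length 1 0

-- ===== PORT B =====
-- 'for v in sorted(cnt): if v < expected: continue; if v > expected: break; …'
def solutionAltWalk (cnt : PySem.Dict Int Int) : List Int → Int → Int → Int
  | [], _, answer => answer
  | v :: rest, expected, answer =>
    if v < expected then solutionAltWalk cnt rest expected answer
    else if v > expected then answer
    else solutionAltWalk cnt rest (expected + 1)
      (if cnt.getD v 0 > answer then cnt.getD v 0 else answer)

def solution_alt (strArr : List String) : Int :=
  let cnt : PySem.Dict Int Int :=
    strArr.foldl (fun d s => d.insert (PySem.Str.len s) (d.getD (PySem.Str.len s) 0 + 1))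
      PySem.Dict.empty
  solutionAltWalk cnt (PySem.List.sorted cnt.keys (fun x => x) false) 1 0

-- ===== PRECONDITION & SPEC =====
def Spec_solution (strArr : List String) (out : Int) : Prop := out = solution_alt strArr
instance (strArr : List String) (out : Int) : Decidable (Spec_solution strArr out) := by unfold Spec_solution; infer_instance

-- ===== CLAIM (what is proved, stated in full; the proofs are below) =====
def Claim_equal_solution : Prop := ∀ (strArr : List String), Dom_solution strArr → Spec_solution strArr (solution strArr)

-- ===== LEMMAS AND PROOFS =====

-- The walk over a strictly increasing list of exactly the values of L that are ≥ expected
-- (below-expected values may prefix it) computes A's while loop.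
theorem pv_walk_eq (L : List Int) :
    ∀ (ks : List Int) (e a : Int), ks.Pairwise (· < ·) →
      (∀ x, e ≤ x → (x ∈ ks ↔ x ∈ L)) →
      solutionAltWalk (PySem.Dict.counter L) ks e a = solutionLoop L e a := by
  intro ks
  induction ks with
  | nil =>
    intro e a _ hmem
    have he : e ∉ L := by
      intro h
      exact (List.not_mem_nil) ((hmem e le_rfl).mpr h)
    rw [solutionLoop]
    simp [solutionAltWalk, he]
  | cons v rest ih =>
    intro e a hp hmem
    rcases lt_trichotomy v e with hv | hv | hv
    · -- continue: v < e, skipped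
      rw [solutionAltWalk, if_pos hv]
      refine ih e a hp.of_cons ?_
      intro x hx
      constructor
      · intro h; exact (hmem x hx).mp (List.mem_cons_of_mem _ h)
      · intro h
        rcases List.mem_cons.mp ((hmem x hx).mpr h) with h' | h'
        · omega
        · exact h'
    · -- v = e: count it, advance expected
      subst hv
      have hvL : v ∈ L := (hmem v le_rfl).mp (List.mem_cons_self)
      rw [solutionAltWalk, if_neg (lt_irrefl v), if_neg (lt_irrefl v)]
      rw [solutionLoop, dif_pos hvL]
      rw [PySem.Dict.getD_counter]
      refine ih (v + 1) _ hp.of_cons ?_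
      intro x hx
      have hvx : v < x := by omega
      constructor
      · intro h; exact (hmem x (by omega)).mp (List.mem_cons_of_mem _ h)
      · intro h
        rcases List.mem_cons.mp ((hmem x (by omega)).mpr h) with h' | h'
        · omega
        · exact h'
    · -- v > e: break; e is not in L
      have he : e ∉ L := by
        intro h
        rcases List.mem_cons.mp ((hmem e le_rfl).mpr h) with h' | h'
        · omega
        · have := (List.pairwise_cons.mp hp).1 e h'
          omega
      rw [solutionAltWalk, if_neg (by omega), if_pos hv]
      rw [solutionLoop]
      simp [he]

theorem pv_solution_eq (strArr : List String) : solution strArr = solution_alt strArr := by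
  have hL : strArr.foldl (fun acc s => acc ++ [PySem.Str.len s]) [] =
      strArr.map PySem.Str.len := by
    simpa using PySem.List.foldl_append_singleton_eq_map (l := strArr) (f := PySem.Str.len)
  have hcnt : strArr.foldl
      (fun d s => d.insert (PySem.Str.len s) (d.getD (PySem.Str.len s) 0 + 1))
      PySem.Dict.empty = PySem.Dict.counter (strArr.map PySem.Str.len) := by
    rw [← PySem.Dict.foldl_insert_getD_add_one_eq_counter, List.foldl_map]
  show solutionLoop _ 1 0 = solutionAltWalk _ _ 1 0
  rw [hL, hcnt]
  set L := strArr.map PySem.Str.len with hLdef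
  rw [PySem.Dict.keys_counter]
  exact (pv_walk_eq L _ 1 0
    (PySem.List.sorted_ofList_pairwise_lt L)
    (fun x _ => by
      rw [PySem.List.mem_sorted, PySem.Set.mem_ofList])).symm

-- ===== VERDICT (by name: the statement is the Claim_ definition above) =====
theorem solution_spec : Claim_equal_solution := by
  intro strArr _
  exact pv_solution_eq strArr
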